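-- pv_equiv track=rewrite | github.com/austinProGit/scheduler | src/schedule_inspector.py | sophmore_with_4000_level_count
-- ===== SOURCE A (Python) =====
-- def schedule_length(schedule):
--     return len(schedule)
--
-- def semester_type_sequence(schedule):
--     SEMESTER_TYPE_SUCCESSOR = {'Fa': 'Sp', 'Sp': 'Su', 'Su': 'Fa'}
--     sequence = None
--     previous_season = 'Su'
--     if schedule_length(schedule) > 0:
--         sequence = []
--         for semester in schedule:
--             sequence.append(SEMESTER_TYPE_SUCCESSOR[previous_season])
--             previous_season = SEMESTER_TYPE_SUCCESSOR[previous_season]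
--     return sequence
--
-- def last_semester_type(schedule):
--     semester_types = semester_type_sequence(schedule)
--     if semester_types != None:
--         return semester_types[-1]
--     else: return None
--
-- def senior_interval(schedule):
--     last_type = last_semester_type(schedule)
--     if last_type == 'Su':
--         return -3
--     if last_type == 'Sp':
--         return -2
--     if last_type == 'Fa':
--         return -1
--
-- def senior_year_semesters_list(schedule):
--     if schedule == None or schedule == [] or schedule == [[]]:
--         return None
--     senior_semesters = []
--     index = senior_interval(schedule)
--     for i in range(index, 0):
--         for semester in schedule[i]:
--             senior_semesters.append(semester)
--     return senior_semesters
--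
-- def sophmore_interval(schedule):
--     last_type = last_semester_type(schedule)
--     sophmore_schedule = schedule
--     length = schedule_length(schedule)
--     if last_type == 'Su' and length > 6:
--         return sophmore_schedule[:length-6]
--     if last_type == 'Sp' and length > 5:
--         return sophmore_schedule[:length-5]
--     if last_type == 'Fa' and length > 4:
--         return sophmore_schedule[:length-4]
--
-- def sophmore_year_semesters_list(schedule):
--     sophmore_semesters = schedule
--     if sophmore_semesters != None and schedule_length(schedule) > 0:
--         sophmore_semesters = sophmore_interval(schedule)
--         sophmore_semesters = senior_year_semesters_list(sophmore_semesters)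
--     return sophmore_semesters
--
-- def sophmore_with_4000_level_count(schedule):
--     count = 0
--     message = ''
--     sophmore_year = sophmore_year_semesters_list(schedule)
--     if sophmore_year != None:
--         for course in sophmore_year:
--             if ' 4' in course:
--                 count += 1
--                 message += '4000 level course ' + course + ' detected in sophmore year.\n'
--     return count, message
-- ===== SOURCE B (Python) =====
-- def sophmore_with_4000_level_count(schedule):
--     L = len(schedule)
--     threshold = {1: 4, 2: 5, 0: 6}[L % 3]
--     count = 0
--     message = ''
--     if L > threshold:
--         for semester in schedule[L - threshold - 3:L - threshold]:
--             for course in semester: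
--                 if ' 4' in course:
--                     count += 1
--                     message += '4000 level course ' + course + ' detected in sophmore year.\n'
--     return count, message
-- ===== Notes on version B (the rewrite author's own statement) =====
-- stated objective: simpler
-- what changed: Replaces A's six-helper pipeline (building the whole semester-type successor sequence by iteration, truncating, re-deriving the last type, then negative-index looping) with one function that reads the last semester type off L % 3 in closed form and takes the fixed 3-semester sophomore slice by direct arithmetic.
import Mathlib
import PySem

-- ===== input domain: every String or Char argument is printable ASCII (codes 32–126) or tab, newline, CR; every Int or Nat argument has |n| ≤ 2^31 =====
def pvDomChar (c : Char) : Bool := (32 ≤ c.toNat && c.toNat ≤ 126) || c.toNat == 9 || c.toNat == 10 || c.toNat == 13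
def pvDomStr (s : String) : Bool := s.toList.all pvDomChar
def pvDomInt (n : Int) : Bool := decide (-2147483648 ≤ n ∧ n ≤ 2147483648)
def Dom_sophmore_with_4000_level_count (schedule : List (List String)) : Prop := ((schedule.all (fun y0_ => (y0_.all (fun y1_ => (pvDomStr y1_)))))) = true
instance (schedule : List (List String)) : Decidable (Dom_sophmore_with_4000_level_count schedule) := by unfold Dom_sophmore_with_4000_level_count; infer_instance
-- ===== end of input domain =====

-- B replaces A's six-helper pipeline (iteratively built semester-type sequence, truncation,
-- re-derivation of the last type, negative-index loop) with a closed-form L % 3 computation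
-- and one direct 3-semester slice; objective: simpler.


-- ===== PORT A =====
def pvSuccDict : PySem.Dict String String :=
  PySem.Dict.ofList [("Fa", "Sp"), ("Sp", "Su"), ("Su", "Fa")]

def schedule_length (schedule : List (List String)) : Int := schedule.length

def semester_type_sequence (schedule : List (List String)) : Option (List String) :=
  if schedule_length schedule > 0 then
    -- the KeyError-free dict lookup SEMESTER_TYPE_SUCCESSOR[previous_season]: every seed is a key
    some ((schedule.foldl (fun (st : List String × String) _ =>
      let nxt := PySem.Dict.getD pvSuccDict st.2 ""
      (st.1 ++ [nxt], nxt)) ([], "Su")).1)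
  else none

def last_semester_type (schedule : List (List String)) : Option String :=
  match semester_type_sequence schedule with
  | some ts => PySem.List.pyGet? ts (-1)   -- ts[-1]; ts is nonempty whenever it exists
  | none => none

def senior_interval (schedule : List (List String)) : Option Int :=
  let lt := last_semester_type schedule
  if lt = some "Su" then some (-3)
  else if lt = some "Sp" then some (-2)
  else if lt = some "Fa" then some (-1)
  else none

def senior_year_semesters_list (schedule? : Option (List (List String))) : Option (List String) :=
  match schedule? with
  | none => none
  | some schedule =>
    if schedule = [] ∨ schedule = [[]] then none
    else
      match senior_interval schedule with
      | none => none   -- Python would raise TypeError in range(None, 0); unreachable (schedule ≠ [])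
      | some idx =>
        some ((PySem.List.pyRange idx 0 1).foldl
          (fun acc i => acc ++ ((PySem.List.pyGet? schedule i).getD [])) [])
          -- schedule[i]: in range on every input reaching this from the entry point

def sophmore_interval (schedule : List (List String)) : Option (List (List String)) :=
  let last_type := last_semester_type schedule
  let length := schedule_length schedule
  if last_type = some "Su" ∧ length > 6 then some (PySem.List.slice schedule none (some (length - 6)))
  else if last_type = some "Sp" ∧ length > 5 then some (PySem.List.slice schedule none (some (length - 5)))
  else if last_type = some "Fa" ∧ length > 4 then some (PySem.List.slice schedule none (some (length - 4)))
  else none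

def sophmore_year_semesters_list (schedule : List (List String)) : Option (List String) :=
  if schedule_length schedule > 0 then
    senior_year_semesters_list (sophmore_interval schedule)
  else some []   -- only schedule = [] reaches here; Python returns schedule itself, the empty list

def sophmore_with_4000_level_count (schedule : List (List String)) : Int × String :=
  match sophmore_year_semesters_list schedule with
  | none => (0, "")
  | some sophmore_year =>
    sophmore_year.foldl (fun (acc : Int × String) course =>
      if PySem.Str.isIn " 4" course then
        (acc.1 + 1, acc.2 ++ ("4000 level course " ++ course ++ " detected in sophmore year.\n"))
      else acc) (0, "")

-- ===== PORT B =====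
def pvThreshDict : PySem.Dict Int Int := PySem.Dict.ofList [(1, 4), (2, 5), (0, 6)]

def sophmore_with_4000_level_count_alt (schedule : List (List String)) : Int × String :=
  let L : Int := schedule.length
  -- {1: 4, 2: 5, 0: 6}[L % 3]: L % 3 is always a key, so the lookup never raises
  let threshold := PySem.Dict.getD pvThreshDict (PySem.Int.mod L 3) 0
  if L > threshold then
    (PySem.List.slice schedule (some (L - threshold - 3)) (some (L - threshold))).foldl
      (fun acc semester =>
        semester.foldl (fun (acc : Int × String) course =>
          if PySem.Str.isIn " 4" course then
            (acc.1 + 1, acc.2 ++ ("4000 level course " ++ course ++ " detected in sophmore year.\n"))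
          else acc) acc) (0, "")
  else (0, "")

-- ===== PRECONDITION & SPEC =====
def Spec_sophmore_with_4000_level_count (schedule : List (List String)) (out : Int × String) : Prop := out = sophmore_with_4000_level_count_alt schedule
instance (schedule : List (List String)) (out : Int × String) : Decidable (Spec_sophmore_with_4000_level_count schedule out) := by unfold Spec_sophmore_with_4000_level_count; infer_instance

-- ===== CLAIM (what is proved, stated in full; the proofs are below) =====
def Claim_equal_sophmore_with_4000_level_count : Prop := ∀ (schedule : List (List String)), Dom_sophmore_with_4000_level_count schedule → Spec_sophmore_with_4000_level_count schedule (sophmore_with_4000_level_count schedule)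

-- ===== LEMMAS AND PROOFS =====

-- n-fold successor, applied outermost-last
def pvSuccN : Nat → String → String
  | 0, s => s
  | n + 1, s => PySem.Dict.getD pvSuccDict (pvSuccN n s) ""

-- the last semester type as a function of the residue of the length mod 3
def pvTypeOf (r : Nat) : String := if r = 1 then "Fa" else if r = 2 then "Sp" else "Su"

theorem pvSuccN_shift (n : Nat) (s : String) :
    pvSuccN n (PySem.Dict.getD pvSuccDict s "") = pvSuccN (n + 1) s := by
  induction n with
  | zero => rfl
  | succ m ih => simp [pvSuccN, ih]

theorem pvFold_seq (xs : List (List String)) (acc : List String) (s : String) :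
    xs.foldl (fun (st : List String × String) _ =>
      let nxt := PySem.Dict.getD pvSuccDict st.2 ""
      (st.1 ++ [nxt], nxt)) (acc, s)
    = (acc ++ (List.range xs.length).map (fun i => pvSuccN (i + 1) s), pvSuccN xs.length s) := by
  induction xs generalizing acc s with
  | nil => simp [pvSuccN]
  | cons x t ih =>
    simp only [List.foldl_cons, ih, List.length_cons, Prod.mk.injEq]
    refine ⟨?_, ?_⟩
    · rw [List.range_succ_eq_map]
      simp only [List.map_cons, List.map_map]
      rw [List.append_assoc]
      have hm : (List.map (fun i => pvSuccN (i + 1) (PySem.Dict.getD pvSuccDict s "")) (List.range t.length))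
          = List.map ((fun i => pvSuccN (i + 1) s) ∘ (· + 1)) (List.range t.length) :=
        List.map_congr_left (fun a _ => pvSuccN_shift _ _)
      rw [hm]
      simp [pvSuccN]
    · rw [pvSuccN_shift]

theorem pvSuccN_Su (n : Nat) : pvSuccN n "Su" = pvTypeOf (n % 3) := by
  induction n with
  | zero => rfl
  | succ m ih =>
    have h3 : m % 3 = 0 ∨ m % 3 = 1 ∨ m % 3 = 2 := by omega
    rcases h3 with h | h | h <;>
      · simp only [pvSuccN, ih, h, pvTypeOf]
        have h1 : (m + 1) % 3 = (m % 3 + 1) % 3 := by omega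
        rw [h1, h]
        rfl

theorem pvLastType (schedule : List (List String)) (h : schedule ≠ []) :
    last_semester_type schedule = some (pvTypeOf (schedule.length % 3)) := by
  have hl : 0 < schedule.length := List.length_pos_iff.mpr h
  obtain ⟨m, hm⟩ : ∃ m, schedule.length = m + 1 := ⟨schedule.length - 1, by omega⟩
  simp only [last_semester_type, semester_type_sequence, schedule_length]
  rw [if_pos (by exact_mod_cast hl)]
  rw [pvFold_seq]
  simp only [hm, List.range_succ, List.map_append, List.map_cons, List.map_nil,
    List.nil_append, ← List.append_assoc]
  rw [PySem.List.pyGet?_neg_one_append_singleton]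
  rw [pvSuccN_Su]

theorem pvFold3 (t : List (List String)) (a b c : List String) :
    ([(-3 : Int), -2, -1].foldl
      (fun acc i => acc ++ ((PySem.List.pyGet? (t ++ [a, b, c]) i).getD [])) [])
    = a ++ b ++ c := by
  simp [PySem.List.pyGet?, PySem.List.pyIdx?]

theorem pvSenior (p : List (List String)) (h3 : 3 ≤ p.length) (h0 : p.length % 3 = 0) :
    senior_year_semesters_list (some p) = some ((p.drop (p.length - 3)).flatten) := by
  have hne : p ≠ [] := by intro h; subst h; simp at h3
  have hlast := pvLastType p hne
  have hguard : ¬(p = [] ∨ p = [[]]) := by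
    rintro (h | h) <;> subst h <;> simp at h3
  have hsu : pvTypeOf (p.length % 3) = "Su" := by rw [h0]; rfl
  simp only [senior_year_semesters_list, if_neg hguard, senior_interval, hlast, hsu, if_true]
  have hd : (p.drop (p.length - 3)).length = 3 := by
    rw [List.length_drop]; omega
  obtain ⟨a, b, c, habc⟩ := List.length_eq_three.mp hd
  have hp : p = p.take (p.length - 3) ++ [a, b, c] := by
    rw [← habc]; exact (List.take_append_drop _ _).symm
  rw [show PySem.List.pyRange (-3) 0 1 = [-3, -2, -1] from by decide]
  rw [habc]
  conv_lhs => rw [hp]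
  rw [pvFold3]
  simp

theorem pvPrefixSenior (schedule : List (List String)) (q : Nat)
    (h3 : 3 ≤ q) (hq : q ≤ schedule.length) (h0 : q % 3 = 0) :
    senior_year_semesters_list (some (PySem.List.slice schedule none (some (q : Int))))
      = some (((schedule.drop (q - 3)).take 3).flatten) := by
  rw [PySem.List.slice_to_natCast]
  have hlen : (schedule.take q).length = q := by simp; omega
  rw [pvSenior _ (by omega) (by rw [hlen]; exact h0)]
  rw [hlen, List.drop_take]
  have h4 : q - (q - 3) = 3 := by omega
  rw [h4]

theorem pvSliceEq (schedule : List (List String)) (q : Nat) (h3 : 3 ≤ q) :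
    PySem.List.slice schedule (some ((q : Int) - 3)) (some (q : Int))
      = (schedule.drop (q - 3)).take 3 := by
  rw [PySem.List.slice_toNat]
  have h1 : ((q : Int) - 3).toNat = q - 3 := by omega
  have h2 : (q : Int).toNat - (q - 3) = 3 := by omega
  rw [h1, h2]
  all_goals omega

theorem sophmore_with_4000_level_count_spec : Claim_equal_sophmore_with_4000_level_count := by
  intro schedule _
  unfold Spec_sophmore_with_4000_level_count
  by_cases hnil : schedule = []
  · subst hnil; decide
  · have hpos : 0 < schedule.length := List.length_pos_iff.mpr hnil
    have hlast := pvLastType schedule hnil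
    have hmod : PySem.Int.mod (schedule.length : Int) 3 = ((schedule.length % 3 : Nat) : Int) :=
      PySem.Int.mod_natCast _ _
    simp only [sophmore_with_4000_level_count, sophmore_with_4000_level_count_alt,
      sophmore_year_semesters_list, sophmore_interval, schedule_length, hlast, hmod]
    rw [if_pos (by exact_mod_cast hpos)]
    rcases (by omega : schedule.length % 3 = 0 ∨ schedule.length % 3 = 1 ∨ schedule.length % 3 = 2)
      with hr | hr | hr <;> rw [hr]
    · -- last type "Su", threshold 6
      rw [show pvTypeOf 0 = "Su" from rfl,
        show PySem.Dict.getD pvThreshDict ((0 : Nat) : Int) 0 = 6 from by decide]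
      by_cases h6 : (schedule.length : Int) > 6
      · rw [if_pos ⟨rfl, h6⟩, if_pos h6]
        have hq : (schedule.length : Int) - 6 = ((schedule.length - 6 : Nat) : Int) := by omega
        rw [hq]
        rw [pvPrefixSenior schedule (schedule.length - 6) (by omega) (by omega) (by omega)]
        simp only []
        rw [List.foldl_flatten, pvSliceEq schedule (schedule.length - 6) (by omega)]
      · rw [if_neg (fun h => h6 h.2), if_neg (by simp), if_neg (by simp), if_neg h6]
        rfl
    · -- last type "Fa", threshold 4
      rw [show pvTypeOf 1 = "Fa" from rfl,
        show PySem.Dict.getD pvThreshDict ((1 : Nat) : Int) 0 = 4 from by decide]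
      by_cases h4 : (schedule.length : Int) > 4
      · rw [if_neg (by simp), if_neg (by simp), if_pos ⟨rfl, h4⟩, if_pos h4]
        have hq : (schedule.length : Int) - 4 = ((schedule.length - 4 : Nat) : Int) := by omega
        rw [hq]
        rw [pvPrefixSenior schedule (schedule.length - 4) (by omega) (by omega) (by omega)]
        simp only []
        rw [List.foldl_flatten, pvSliceEq schedule (schedule.length - 4) (by omega)]
      · rw [if_neg (by simp), if_neg (by simp), if_neg (fun h => h4 h.2), if_neg h4]
        rfl
    · -- last type "Sp", threshold 5
      rw [show pvTypeOf 2 = "Sp" from rfl,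
        show PySem.Dict.getD pvThreshDict ((2 : Nat) : Int) 0 = 5 from by decide]
      by_cases h5 : (schedule.length : Int) > 5
      · rw [if_neg (by simp), if_pos ⟨rfl, h5⟩, if_pos h5]
        have hq : (schedule.length : Int) - 5 = ((schedule.length - 5 : Nat) : Int) := by omega
        rw [hq]
        rw [pvPrefixSenior schedule (schedule.length - 5) (by omega) (by omega) (by omega)]
        simp only []
        rw [List.foldl_flatten, pvSliceEq schedule (schedule.length - 5) (by omega)]
      · rw [if_neg (by simp), if_neg (fun h => h5 h.2), if_neg (by simp), if_neg h5]
        rfl
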